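-- pv_equiv track=rewrite | github.com/sihcpro/DetectSimilarCodeWeb | checkHash.py | getArrayCopied
-- ===== SOURCE A (Python) =====
-- def getArrayCopied(arr):
-- 	res = []
-- 	l = -1
-- 	r = -1
-- 	for i in range(len(arr)):
-- 		if (arr[i] >= 1):
-- 			if (l == -1):
-- 				l = i
-- 				r = i
-- 			else:
-- 				r += 1
-- 		else:
-- 			if (l != -1):
-- 				res.append((l, r))
-- 				l = -1
-- 	if (l != -1):
-- 		res.append((l,r))
-- 	return res
-- ===== SOURCE B (Python) =====
-- def getArrayCopied(arr):
-- 	pos = [x >= 1 for x in arr]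
-- 	starts = [i for i, (c, p) in enumerate(zip(pos, [False] + pos)) if c and not p]
-- 	ends = [i for i, (c, nx) in enumerate(zip(pos, pos[1:] + [False])) if c and not nx]
-- 	return list(zip(starts, ends))
-- ===== Notes on version B (the rewrite author's own statement) =====
-- stated objective: alternative
-- what changed: Replaces A's single-pass l/r sentinel state machine with edge detection: build the boolean mask xs>=1, extract rising-edge indices (starts) and falling-edge indices (ends) as two separate filtered lists, and zip them into intervals.
import Mathlib
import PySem

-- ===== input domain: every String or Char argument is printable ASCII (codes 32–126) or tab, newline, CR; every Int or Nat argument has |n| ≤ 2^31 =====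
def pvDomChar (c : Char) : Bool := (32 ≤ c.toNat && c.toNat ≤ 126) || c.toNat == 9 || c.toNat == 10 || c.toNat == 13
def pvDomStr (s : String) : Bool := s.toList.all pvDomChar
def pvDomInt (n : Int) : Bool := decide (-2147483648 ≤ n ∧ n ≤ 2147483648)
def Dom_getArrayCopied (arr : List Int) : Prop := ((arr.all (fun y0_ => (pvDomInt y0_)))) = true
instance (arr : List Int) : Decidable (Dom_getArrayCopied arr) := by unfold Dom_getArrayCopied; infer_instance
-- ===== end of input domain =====

-- B replaces A's l/r sentinel state machine with boolean-mask edge detection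
-- (rising-edge starts, falling-edge ends, zipped) — an alternative decomposition, same cost.

-- ===== PORT A =====
-- A's for-loop over range(len(arr)) with state (res, l, r), transcribed as the obvious
-- structural recursion carrying the index i and the same state.
def goA (arr : List Int) (i : Int) (res : List (Int × Int)) (l r : Int) : List (Int × Int) :=
  match arr with
  | [] => if l ≠ -1 then res ++ [(l, r)] else res
  | x :: xs =>
    if 1 ≤ x then
      if l = -1 then goA xs (i + 1) res i i
      else goA xs (i + 1) res l (r + 1)
    else
      if l ≠ -1 then goA xs (i + 1) (res ++ [(l, r)]) (-1) r
      else goA xs (i + 1) res l r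

def getArrayCopied (arr : List Int) : List (Int × Int) := goA arr 0 [] (-1) (-1)

-- ===== PORT B =====
-- Source B's list comprehension `[i for i,(c,p) in enumerate(z) if c and not p]`:
-- enumerate's counter becomes the recursion's integer argument i.
def startsOf (i : Int) (z : List (Bool × Bool)) : List Int :=
  match z with
  | [] => []
  | (c, p) :: t => if c && !p then i :: startsOf (i + 1) t else startsOf (i + 1) t

-- Source B's `[i for i,(c,nx) in enumerate(z) if c and not nx]`, same transcription.
def endsOf (i : Int) (z : List (Bool × Bool)) : List Int :=
  match z with
  | [] => []
  | (c, nx) :: t => if c && !nx then i :: endsOf (i + 1) t else endsOf (i + 1) t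

def getArrayCopied_alt (arr : List Int) : List (Int × Int) :=
  let pos := arr.map (fun x => decide (1 ≤ x))
  let starts := startsOf 0 (pos.zip (false :: pos))
  let ends := endsOf 0 (pos.zip (pos.drop 1 ++ [false]))
  starts.zip ends

-- ===== PRECONDITION & SPEC =====
def Spec_getArrayCopied (arr : List Int) (out : List (Int × Int)) : Prop := out = getArrayCopied_alt arr
instance (arr : List Int) (out : List (Int × Int)) : Decidable (Spec_getArrayCopied arr out) := by unfold Spec_getArrayCopied; infer_instance

-- ===== CLAIM (what is proved, stated in full; the proofs are below) =====
def Claim_equal_getArrayCopied : Prop := ∀ (arr : List Int), Dom_getArrayCopied arr → Spec_getArrayCopied arr (getArrayCopied arr)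

-- ===== LEMMAS AND PROOFS =====

-- reference run decomposition both ports are reduced to:
-- a positive head opens a run of length 1+k contributing (i, i+k); a negative head is skipped.
def runs (i : Int) (xs : List Int) : List (Int × Int) :=
  match xs with
  | [] => []
  | x :: t =>
    if 1 ≤ x then
      let k := (t.takeWhile (fun y => decide (1 ≤ y))).length
      (i, i + k) :: runs (i + k + 1) (t.dropWhile (fun y => decide (1 ≤ y)))
    else
      runs (i + 1) t
termination_by xs.length
decreasing_by
  · exact Nat.lt_succ_of_le (List.length_dropWhile_le _ _)
  · exact Nat.lt_succ_of_le (Nat.le_refl _)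

-- St/En: the two comprehensions on the self-shifted zips, as recursions on the mask list
lemma St_cons (q c : Bool) (t : List Bool) (i : Int) :
    startsOf i (List.zip (c :: t) (q :: c :: t)) =
      (if c && !q then [i] else []) ++ startsOf (i + 1) (List.zip t (c :: t)) := by
  by_cases h : c && !q <;> simp [startsOf, List.zip, h]

lemma En_cons (c : Bool) (t : List Bool) (i : Int) :
    endsOf i (List.zip (c :: t) ((c :: t).drop 1 ++ [false])) =
      (if c && !(t.headD false) then [i] else []) ++ endsOf (i + 1) (List.zip t (t.drop 1 ++ [false])) := by
  cases t with
  | nil => by_cases h : c <;> simp [endsOf, h]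
  | cons d t2 =>
    by_cases h : c && !d <;> simp [endsOf, List.zip, h]

-- skipping a true-run with previous element true emits no start
lemma St_skip_true (l : List Bool) : ∀ (i : Int),
    startsOf i (List.zip l (true :: l)) =
      startsOf (i + ((l.takeWhile id).length : Int)) (List.zip (l.dropWhile id) (false :: l.dropWhile id)) := by
  induction l with
  | nil => intro i; simp [startsOf]
  | cons c t ih =>
    intro i
    cases c with
    | true =>
      rw [St_cons, List.takeWhile_cons_of_pos (by simp), List.dropWhile_cons_of_pos (by simp),
          ih (i + 1)]
      simp only [Bool.not_true, Bool.and_false, Bool.false_eq_true, if_false, List.nil_append]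
      congr 1
      push_cast [List.length_cons]
      ring
    | false =>
      rw [St_cons, List.takeWhile_cons_of_neg (by simp), List.dropWhile_cons_of_neg (by simp)]
      simp [startsOf, List.zip]

-- a nonempty true-run starting the list emits exactly one end, at its last index
lemma En_run (l : List Bool) : ∀ (i : Int), l.headD false = true →
    endsOf i (List.zip l (l.drop 1 ++ [false])) =
      (i + ((l.takeWhile id).length : Int) - 1) ::
        endsOf (i + ((l.takeWhile id).length : Int))
          (List.zip (l.dropWhile id) ((l.dropWhile id).drop 1 ++ [false])) := by
  induction l with
  | nil => intro i h; simp at h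
  | cons c t ih =>
    intro i h
    simp only [List.headD_cons] at h
    subst h
    rw [En_cons, List.takeWhile_cons_of_pos (by simp), List.dropWhile_cons_of_pos (by simp)]
    by_cases ht : t.headD false = true
    · rw [ih (i + 1) ht]
      simp only [ht, Bool.not_true, Bool.and_false, Bool.false_eq_true, if_false,
        List.nil_append, List.length_cons]
      refine congrArg₂ _ (by push_cast; ring) (congrArg₂ _ (by push_cast; ring) rfl)
    · have ht' : t.headD false = false := by simpa using ht
      have htw : t.takeWhile id = [] := by
        cases t with
        | nil => rfl
        | cons d t2 =>
          simp only [List.headD_cons] at ht'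
          rw [List.takeWhile_cons_of_neg (by simp [ht'])]
      have hdw : t.dropWhile id = t := by
        cases t with
        | nil => rfl
        | cons d t2 =>
          simp only [List.headD_cons] at ht'
          rw [List.dropWhile_cons_of_neg (by simp [ht'])]
      simp only [ht', htw, hdw, Bool.not_false, Bool.and_true,
        List.length_cons, List.length_nil]
      norm_num

-- main zip lemma: starts zipped with ends is exactly the run decomposition, on the mask of arr
lemma zip_runs_aux (n : Nat) : ∀ (arr : List Int), arr.length ≤ n → ∀ (i : Int),
    (startsOf i (List.zip (arr.map (fun x => decide (1 ≤ x))) (false :: arr.map (fun x => decide (1 ≤ x))))).zip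
      (endsOf i (List.zip (arr.map (fun x => decide (1 ≤ x))) ((arr.map (fun x => decide (1 ≤ x))).drop 1 ++ [false]))) =
    runs i arr := by
  induction n with
  | zero =>
    intro arr hlen i
    rw [List.length_eq_zero_iff.mp (Nat.le_zero.mp hlen)]
    simp [startsOf, endsOf, runs]
  | succ n ih =>
    intro arr hlen i
    cases arr with
    | nil => simp [startsOf, endsOf, runs]
    | cons x t =>
      simp only [List.map_cons]
      by_cases hx : (1:Int) ≤ x
      · have hpos : decide (1 ≤ x) = true := by simp [hx]
        rw [hpos, St_cons, runs]
        simp only [hx, if_true, Bool.not_false, Bool.and_true, List.singleton_append]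
        have hmapTW : (t.map (fun x => decide (1 ≤ x))).takeWhile id
            = (t.takeWhile (fun y => decide (1 ≤ y))).map (fun x => decide (1 ≤ x)) := by
          rw [List.takeWhile_map]; rfl
        have hmapDW : (t.map (fun x => decide (1 ≤ x))).dropWhile id
            = (t.dropWhile (fun y => decide (1 ≤ y))).map (fun x => decide (1 ≤ x)) := by
          rw [List.dropWhile_map]; rfl
        set k : Nat := (t.takeWhile (fun y => decide (1 ≤ y))).length with hk
        set d : List Int := t.dropWhile (fun y => decide (1 ≤ y)) with hd
        have hklen : ((t.map (fun x => decide (1 ≤ x))).takeWhile id).length = k := by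
          rw [hmapTW, List.length_map]
        rw [St_skip_true, hklen, hmapDW]
        rw [En_run _ i (by simp)]
        have hdlen : d.length ≤ n := by
          rw [hd]
          have := List.length_dropWhile_le (fun y => decide (1 ≤ y)) t
          simp only [List.length_cons] at hlen
          omega
        rw [List.takeWhile_cons_of_pos (by simp), List.dropWhile_cons_of_pos (by simp),
            List.length_cons, hklen, hmapDW, List.zip_cons_cons,
            show i + ((k + 1 : Nat) : Int) - 1 = i + k from by push_cast; ring,
            show i + ((k + 1 : Nat) : Int) = i + k + 1 from by push_cast; ring,
            show i + 1 + (k : Int) = i + k + 1 from by ring]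
        exact congrArg _ (ih d hdlen (i + k + 1))
      · have hneg : decide (1 ≤ x) = false := by simp [hx]
        rw [hneg, St_cons, En_cons, runs]
        simp only [hx, if_false, Bool.false_and, Bool.false_eq_true, List.nil_append]
        exact ih t (by simp only [List.length_cons] at hlen; omega) (i + 1)

-- A's state machine against the run decomposition:
-- (1) closed state (l = -1, r dead);  (2) open run started at l, r = i - 1.
lemma goA_inv (arr : List Int) :
    (∀ (i : Int) (res : List (Int × Int)) (r : Int), 0 ≤ i →
        goA arr i res (-1) r = res ++ runs i arr) ∧
    (∀ (i : Int) (res : List (Int × Int)) (l : Int), 0 ≤ i → l ≠ -1 →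
        goA arr i res l (i - 1) =
          res ++ (l, i - 1 + ((arr.takeWhile (fun y => decide (1 ≤ y))).length : Int)) ::
            runs (i + ((arr.takeWhile (fun y => decide (1 ≤ y))).length : Int))
              (arr.dropWhile (fun y => decide (1 ≤ y)))) := by
  induction arr with
  | nil =>
    constructor
    · intro i res r _; simp [goA, runs]
    · intro i res l _ hl; simp [goA, runs, hl]
  | cons x t ih =>
    obtain ⟨ih1, ih2⟩ := ih
    constructor
    · intro i res r hi
      rw [goA]
      by_cases hx : (1:Int) ≤ x
      · simp only [hx, if_true]
        have := ih2 (i + 1) res i (by omega) (by omega)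
        rw [show i + 1 - 1 = i from by ring] at this
        rw [this, runs]
        simp only [hx, if_true]
        ring_nf
      · simp only [hx, if_false, ne_eq, not_true_eq_false, if_false]
        rw [ih1 (i + 1) res r (by omega), runs]
        simp [hx]
    · intro i res l hi hl
      rw [goA]
      by_cases hx : (1:Int) ≤ x
      · simp only [hx, if_true, hl, if_false]
        have := ih2 (i + 1) res l (by omega) hl
        rw [show i + 1 - 1 = i from by ring] at this
        rw [show i - 1 + 1 = i from by ring, this,
            List.takeWhile_cons_of_pos (by simp [hx]), List.dropWhile_cons_of_pos (by simp [hx])]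
        simp only [List.length_cons]
        push_cast
        ring_nf
      · simp only [hx, if_false, hl, ne_eq, not_false_eq_true, if_true]
        rw [ih1 (i + 1) (res ++ [(l, i - 1)]) (i - 1) (by omega)]
        rw [List.takeWhile_cons_of_neg (by simp [hx]), List.dropWhile_cons_of_neg (by simp [hx]), runs]
        simp [hx]

-- ===== VERDICT (by name: the statement is the Claim_ definition above) =====
theorem getArrayCopied_spec : Claim_equal_getArrayCopied := by
  intro arr _
  unfold Spec_getArrayCopied getArrayCopied getArrayCopied_alt
  rw [(goA_inv arr).1 0 [] (-1) (by norm_num), List.nil_append]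
  exact (zip_runs_aux arr.length arr (Nat.le_refl _) 0).symm
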